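-- pv_equiv track=rewrite | github.com/captionpoint/captionpoint-plays | python scripts/captionpoint-start.py | split_into_slides
-- ===== SOURCE A (Python) =====
-- def split_into_slides(text, max_lines=4):
--     lines = text.split('\n')
--     slides = []
--     current_slide = []
--
--     for line in lines:
--         if line.strip() == "":
--             continue
--         current_slide.append(line.strip())
--         if len(current_slide) >= max_lines:
--             slides.append(current_slide)
--             current_slide = []
--
--     if current_slide:
--         slides.append(current_slide)
--
--     return slides
-- ===== SOURCE B (Python) =====
-- def split_into_slides(text, max_lines=4):
--     cleaned = [l.strip() for l in text.split('\n') if l.strip()]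
--     step = max_lines if max_lines >= 1 else 1
--     return [cleaned[i:i+step] for i in range(0, len(cleaned), step)]
-- ===== Notes on version B (the rewrite author's own statement) =====
-- stated objective: simpler
-- what changed: Replaces the accumulator-and-flush loop with a filter/strip pass followed by index-stepped slicing (chunk size clamped to at least 1, matching one-line-per-slide for non-positive max_lines).
import Mathlib
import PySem

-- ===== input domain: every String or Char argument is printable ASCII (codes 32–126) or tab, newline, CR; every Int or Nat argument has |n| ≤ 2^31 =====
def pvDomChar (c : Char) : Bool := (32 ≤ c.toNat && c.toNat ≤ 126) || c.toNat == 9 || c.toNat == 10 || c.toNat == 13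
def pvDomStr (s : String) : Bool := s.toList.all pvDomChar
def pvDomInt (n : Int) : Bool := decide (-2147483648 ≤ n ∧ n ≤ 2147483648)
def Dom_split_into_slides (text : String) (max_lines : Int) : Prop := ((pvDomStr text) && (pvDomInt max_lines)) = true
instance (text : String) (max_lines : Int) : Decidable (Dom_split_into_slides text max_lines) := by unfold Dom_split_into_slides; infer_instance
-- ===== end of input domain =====

-- B groups the stripped non-empty lines by a filter pass plus index-stepped slicing instead of A's accumulator-and-flush loop (objective: simpler).

-- ===== PORT A =====
-- A's loop body: skip blank lines, append the stripped line, flush when the slide is full.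
def pvStepA (max_lines : Int) (st : List (List String) × List String) (line : String) :
    List (List String) × List String :=
  if PySem.Str.strip line = "" then st
  else
    let cur := st.2 ++ [PySem.Str.strip line]
    if (cur.length : Int) ≥ max_lines then (st.1 ++ [cur], []) else (st.1, cur)

-- A's trailing "if current_slide: slides.append(current_slide)".
def pvFlushA (st : List (List String) × List String) : List (List String) :=
  if st.2 ≠ [] then st.1 ++ [st.2] else st.1

def split_into_slides (text : String) (max_lines : Int) : List (List String) :=
  let lines := (PySem.Str.split? text "\n").getD []   -- separator "\n" is nonempty, so split? never raises
  pvFlushA (lines.foldl (pvStepA max_lines) ([], []))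

-- ===== PORT B =====
def split_into_slides_alt (text : String) (max_lines : Int) : List (List String) :=
  let cleaned := ((((PySem.Str.split? text "\n").getD []).filter
      (fun l => PySem.Str.strip l ≠ "")).map PySem.Str.strip)
  let step : Int := if max_lines ≥ 1 then max_lines else 1
  (PySem.List.pyRange 0 (cleaned.length : Int) step).map
    (fun i => PySem.List.slice cleaned (some i) (some (i + step)))

-- ===== PRECONDITION & SPEC =====
def Spec_split_into_slides (text : String) (max_lines : Int) (out : List (List String)) : Prop := out = split_into_slides_alt text max_lines
instance (text : String) (max_lines : Int) (out : List (List String)) : Decidable (Spec_split_into_slides text max_lines out) := by unfold Spec_split_into_slides; infer_instance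

-- ===== CLAIM (what is proved, stated in full; the proofs are below) =====
def Claim_equal_split_into_slides : Prop := ∀ (text : String) (max_lines : Int), Dom_split_into_slides text max_lines → Spec_split_into_slides text max_lines (split_into_slides text max_lines)

-- ===== LEMMAS AND PROOFS =====

-- Reference chunking with chunk size k+1 (proof-side only).
def pvChunks (k : Nat) : List String → List (List String)
  | [] => []
  | x :: xs => (x :: xs.take k) :: pvChunks k (xs.drop k)
termination_by xs => xs.length
decreasing_by simp

lemma pvChunks_nil (k : Nat) : pvChunks k [] = [] := by rw [pvChunks]

lemma pvChunks_cons (k : Nat) (x : String) (xs : List String) :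
    pvChunks k (x :: xs) = (x :: xs.take k) :: pvChunks k (xs.drop k) := by rw [pvChunks]

lemma pvChunks_append (k : Nat) (ys zs : List String) (h : ys.length = k + 1) :
    pvChunks k (ys ++ zs) = ys :: pvChunks k zs := by
  cases ys with
  | nil => simp at h
  | cons y t =>
    have ht : t.length = k := by simpa using h
    rw [List.cons_append, pvChunks_cons, List.take_append_of_le_length (by omega),
        List.take_of_length_le (by omega), List.drop_append_of_le_length (by omega),
        List.drop_of_length_le (by omega)]
    simp

lemma pvChunks_short (k : Nat) (ys : List String) (h : ys.length ≤ k + 1) (hne : ys ≠ []) :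
    pvChunks k ys = [ys] := by
  cases ys with
  | nil => simp at hne
  | cons y t =>
    rw [pvChunks_cons, List.take_of_length_le (by simp at h; omega),
        List.drop_of_length_le (by simp at h; omega), pvChunks_nil]

-- A's loop, flushed, chunks the pending slide plus the remaining cleaned lines.
lemma loopA_eq (ml : Int) (sn : Nat) (hsn : sn = if 1 ≤ ml then ml.toNat else 1) :
    ∀ (lines : List String) (slides : List (List String)) (cur : List String),
      cur.length < sn →
      pvFlushA (lines.foldl (pvStepA ml) (slides, cur)) =
        slides ++ pvChunks (sn - 1)
          (cur ++ (lines.filter (fun l => PySem.Str.strip l ≠ "")).map PySem.Str.strip) := by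
  have hs1 : 1 ≤ sn := by
    rw [hsn]; by_cases h1 : 1 ≤ ml
    · rw [if_pos h1]; omega
    · rw [if_neg h1]
  intro lines
  induction lines with
  | nil =>
    intro slides cur hcur
    by_cases hc : cur = []
    · simp [pvFlushA, hc, pvChunks_nil]
    · simp only [List.foldl_nil, List.filter_nil, List.map_nil, List.append_nil]
      rw [pvChunks_short (sn - 1) cur (by omega) hc]
      simp [pvFlushA, hc]
  | cons line rest ih =>
    intro slides cur hcur
    rw [List.foldl_cons]
    by_cases hblank : PySem.Str.strip line = ""
    · rw [show pvStepA ml (slides, cur) line = (slides, cur) from by simp [pvStepA, hblank]]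
      rw [ih _ _ hcur]
      simp [hblank]
    · have hfilter : (line :: rest).filter (fun l => PySem.Str.strip l ≠ "") =
          line :: rest.filter (fun l => PySem.Str.strip l ≠ "") := by
        simp [hblank]
      rw [hfilter, List.map_cons]
      have hl : (cur ++ [PySem.Str.strip line]).length = cur.length + 1 := by simp
      by_cases hfull : ((cur ++ [PySem.Str.strip line]).length : Int) ≥ ml
      · rw [show pvStepA ml (slides, cur) line = (slides ++ [cur ++ [PySem.Str.strip line]], [])
            from by simp only [pvStepA, if_neg hblank]; rw [if_pos hfull]]
        have hlen : (cur ++ [PySem.Str.strip line]).length = sn := by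
          rw [hl] at hfull ⊢
          by_cases h1 : 1 ≤ ml
          · rw [hsn, if_pos h1] at hcur ⊢; omega
          · rw [hsn, if_neg h1] at hcur ⊢; omega
        rw [ih (slides ++ [cur ++ [PySem.Str.strip line]]) [] (by simp only [List.length_nil]; omega)]
        simp only [List.nil_append]
        rw [show cur ++ PySem.Str.strip line ::
              (rest.filter (fun l => PySem.Str.strip l ≠ "")).map PySem.Str.strip =
            (cur ++ [PySem.Str.strip line]) ++
              (rest.filter (fun l => PySem.Str.strip l ≠ "")).map PySem.Str.strip from by simp]
        rw [pvChunks_append (sn - 1) _ _ (by omega)]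
        simp
      · rw [show pvStepA ml (slides, cur) line = (slides, cur ++ [PySem.Str.strip line])
            from by simp only [pvStepA, if_neg hblank]; rw [if_neg hfull]]
        have hlt : (cur ++ [PySem.Str.strip line]).length < sn := by
          rw [hl] at hfull ⊢
          by_cases h1 : 1 ≤ ml
          · rw [hsn, if_pos h1] at ⊢; omega
          · exact absurd (by omega : (↑(cur.length + 1) : Int) ≥ ml) hfull
        rw [ih _ _ hlt]
        simp

-- pyRange with positive step: cons form.
lemma pvRange_cons (a b s : Int) (hs : 0 < s) (hab : a < b) :
    PySem.List.pyRange a b s = a :: PySem.List.pyRange (a + s) b s := by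
  rw [PySem.List.pyRange_of_pos a b hs, PySem.List.pyRange_of_pos (a + s) b hs]
  by_cases h2 : a + s < b
  · rw [if_pos hab, if_pos h2]
    have hm : (b - a + s - 1) / s = (b - (a + s) + s - 1) / s + 1 := by
      have : b - a + s - 1 = (b - (a + s) + s - 1) + 1 * s := by ring
      rw [this, Int.add_mul_ediv_right _ _ (by omega)]
    have hm' : ((b - a + s - 1) / s).toNat = ((b - (a + s) + s - 1) / s).toNat + 1 := by
      have h0 : 0 ≤ (b - (a + s) + s - 1) / s := Int.ediv_nonneg (by omega) (by omega)
      omega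
    rw [hm', List.range_succ_eq_map]
    simp only [List.map_cons, List.map_map]
    congr 1
    · simp
    · apply List.map_congr_left
      intro k _
      simp only [Function.comp_apply]
      push_cast; ring
  · rw [if_pos hab, if_neg h2]
    have hm : ((b - a + s - 1) / s).toNat = 1 := by
      have h1 : (b - a + s - 1) / s = 1 := by
        have he : b - a + s - 1 = (b - a - 1) + 1 * s := by ring
        rw [he, Int.add_mul_ediv_right _ _ (by omega : s ≠ 0),
            Int.ediv_eq_zero_of_lt (by omega) (by omega)]
        norm_num
      omega
    simp [hm, List.range_succ]

-- pyRange with positive step shifts.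
lemma pvRange_shift (b s : Int) (hs : 0 < s) :
    PySem.List.pyRange s b s = (PySem.List.pyRange 0 (b - s) s).map (· + s) := by
  rw [PySem.List.pyRange_of_pos s b hs, PySem.List.pyRange_of_pos 0 (b - s) hs]
  have hcond : (s < b) ↔ ((0 : Int) < b - s) := by omega
  have harg : b - s + s - 1 = b - s - 0 + s - 1 := by ring
  by_cases h : s < b
  · rw [if_pos h, if_pos (by omega), List.map_map, harg]
    apply List.map_congr_left
    intro k _
    simp only [Function.comp_apply]
    ring
  · rw [if_neg h, if_neg (by omega)]; simp

-- B's slicing comprehension computes the reference chunking.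
lemma altB_eq (sn : Nat) (hs : 1 ≤ sn) :
    ∀ (n : Nat) (xs : List String), xs.length ≤ n →
      (PySem.List.pyRange 0 (xs.length : Int) (sn : Int)).map
        (fun i => PySem.List.slice xs (some i) (some (i + (sn : Int)))) =
      pvChunks (sn - 1) xs := by
  intro n
  induction n with
  | zero =>
    intro xs hlen
    have : xs = [] := by cases xs <;> simp_all
    subst this
    simp [PySem.List.pyRange_of_pos 0 0 (by omega : (0:Int) < (sn:Int)), pvChunks]
  | succ m ih =>
    intro xs hlen
    cases xs with
    | nil => simp [PySem.List.pyRange_of_pos 0 0 (by omega : (0:Int) < (sn:Int)), pvChunks]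
    | cons x t =>
      have hspos : (0 : Int) < (sn : Int) := by exact_mod_cast hs
      have hnpos : (0 : Int) < ((x :: t).length : Int) := by simp
      rw [pvRange_cons 0 _ _ hspos hnpos]
      simp only [zero_add]
      rw [pvRange_shift _ _ hspos, List.map_cons, List.map_map]
      have hhead : PySem.List.slice (x :: t) (some 0) (some (0 + (sn : Int))) =
          (x :: t).take sn := by
        rw [zero_add, PySem.List.slice_zero_start, PySem.List.slice_to _ (by omega)]
        simp
      have hdrop : (x :: t).drop sn = t.drop (sn - 1) := by
        cases sn with
        | zero => omega
        | succ k => simp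
      have htail : ∀ i ∈ PySem.List.pyRange 0 (((x :: t).length : Int) - (sn : Int)) (sn : Int),
          ((fun i => PySem.List.slice (x :: t) (some i) (some (i + (sn : Int)))) ∘ (· + (sn : Int))) i =
          PySem.List.slice (t.drop (sn - 1)) (some i) (some (i + (sn : Int))) := by
        intro i hi
        have hi0 : 0 ≤ i := ((PySem.List.mem_pyRange_iff_of_pos hspos i).mp hi).1
        simp only [Function.comp_apply]
        rw [PySem.List.slice_toNat _ (by omega) (by omega),
            PySem.List.slice_toNat _ (by omega) (by omega), ← hdrop, List.drop_drop]
        congr 1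
        · omega
        · congr 1
          omega
      rw [List.map_congr_left htail]
      have hlen2 : ((t.drop (sn - 1)).length : Int) = ((x :: t).length : Int) - (sn : Int) ∨
          (PySem.List.pyRange 0 (((x :: t).length : Int) - (sn : Int)) (sn : Int) = [] ∧
           t.drop (sn - 1) = []) := by
        by_cases hle : sn ≤ (x :: t).length
        · left; rw [List.length_drop]; simp only [List.length_cons] at hle ⊢; omega
        · right
          constructor
          · rw [PySem.List.pyRange_of_pos _ _ hspos, if_neg (by simp at hle ⊢; omega)]; simp
          · apply List.drop_eq_nil_of_le; simp at hle ⊢; omega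
      have hrec : (PySem.List.pyRange 0 (((x :: t).length : Int) - (sn : Int)) (sn : Int)).map
          (fun i => PySem.List.slice (t.drop (sn - 1)) (some i) (some (i + (sn : Int)))) =
          pvChunks (sn - 1) (t.drop (sn - 1)) := by
        rcases hlen2 with h | ⟨h1, h2⟩
        · rw [← h]
          exact ih (t.drop (sn - 1))
            (by rw [List.length_drop]; simp only [List.length_cons] at hlen; omega)
        · rw [h1, h2]; simp [pvChunks]
      rw [hrec, hhead]
      show (x :: t).take sn :: _ = pvChunks (sn - 1) (x :: t)
      simp only [pvChunks]
      congr 1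
      cases sn with
      | zero => omega
      | succ k => simp

-- ===== VERDICT (by name: the statement is the Claim_ definition above) =====
theorem split_into_slides_spec : Claim_equal_split_into_slides := by
  intro text max_lines _
  unfold Spec_split_into_slides split_into_slides split_into_slides_alt
  set lines := (PySem.Str.split? text "\n").getD [] with hlines
  set sn : Nat := if 1 ≤ max_lines then max_lines.toNat else 1 with hsn
  have hs1 : 1 ≤ sn := by
    rw [hsn]; by_cases h : 1 ≤ max_lines
    · rw [if_pos h]; omega
    · rw [if_neg h]
  have hstep : (if max_lines ≥ 1 then max_lines else 1) = (sn : Int) := by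
    by_cases h : 1 ≤ max_lines
    · simp [hsn, h, ge_iff_le, Int.toNat_of_nonneg (by omega : (0:Int) ≤ max_lines)]
    · simp [hsn, h, ge_iff_le]
  have hA := loopA_eq max_lines sn hsn lines [] [] (by simp only [List.length_nil]; omega)
  simp only [List.nil_append] at hA
  rw [hA, hstep]
  rw [altB_eq sn hs1 ((lines.filter (fun l => PySem.Str.strip l ≠ "")).map PySem.Str.strip).length _ le_rfl]
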